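-- pv_equiv track=rewrite | github.com/jp31415926/joke-extractor | extractors/01-extract-text.py | cleanup_subject
-- ===== SOURCE A (Python) =====
-- def cleanup_subject(subject: str) -> str:
--     """
--     Clean email subject by stripping common prefixes (RE:, FW:, FWD:) and trimming whitespace.
--
--     Handles multiple prefixes (e.g., "Re: Re: ..." → "original subject") via iteration.
--
--     Parameters
--     ----------
--     subject : str
--         Raw subject line.
--
--     Returns
--     -------
--     str
--         Cleaned subject without leading prefixes and trailing/leading whitespace.
--     """
--     subject = subject.strip()
--     prefixes = ["re:", "fw:", "fwd:"]  # case-insensitive handling via `.lower()`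
--
--     while True:
--         original_length = len(subject)
--         for prefix in prefixes:
--             if subject.lower().startswith(prefix):
--                 subject = subject[len(prefix):].strip()
--                 break  # only remove one prefix per iteration
--         if len(subject) == original_length:
--             break
--
--     return subject
-- ===== SOURCE B (Python) =====
-- def cleanup_subject(subject: str) -> str:
--     """Recursive decomposition: peel prefixes off the left (lstrip + tail
--     recursion), trim the right once at the end."""
--     def drop_prefixes(s: str) -> str:
--         s = s.lstrip()
--         low = s[:4].lower()
--         if low.startswith("re:"):
--             return drop_prefixes(s[3:])
--         if low.startswith("fw:"):
--             return drop_prefixes(s[3:])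
--         if low.startswith("fwd:"):
--             return drop_prefixes(s[4:])
--         return s
--     return drop_prefixes(subject).rstrip()
-- ===== Notes on version B (the rewrite author's own statement) =====
-- stated objective: simpler
-- what changed: Replaces A's fixpoint loop (strip the whole string each round and watch the length to decide when to stop) with a direct recursive peel: lstrip, test the lowered first 4 characters against the three prefixes, recurse on the tail, and rstrip once at the end.
import Mathlib
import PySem

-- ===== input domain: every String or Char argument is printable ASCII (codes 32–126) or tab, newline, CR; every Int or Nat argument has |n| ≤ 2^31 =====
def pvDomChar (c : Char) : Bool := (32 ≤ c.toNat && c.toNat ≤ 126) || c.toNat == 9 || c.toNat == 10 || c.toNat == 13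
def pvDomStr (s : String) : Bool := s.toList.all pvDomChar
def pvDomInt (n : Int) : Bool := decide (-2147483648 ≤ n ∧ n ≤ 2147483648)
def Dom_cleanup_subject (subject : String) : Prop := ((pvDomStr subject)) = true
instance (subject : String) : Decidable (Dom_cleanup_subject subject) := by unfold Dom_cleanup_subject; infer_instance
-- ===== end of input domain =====

-- B replaces A's length-watching while/for loop by a left-to-right recursive peel
-- (lstrip + prefix tests on the lowered first 4 chars) with a single final rstrip (objective: simpler).

-- ===== PORT A =====
-- the body of A's `for prefix in prefixes: … break` (one iteration of the while loop);
-- `subject[len(prefix):]` is `List.drop` by PySem.List.slice_from_natCast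
def cleanupStepA (s : List Char) : List Char :=
  if PySem.Chars.startswith (PySem.Chars.lower s) ['r','e',':'] then
    PySem.Chars.strip (s.drop 3)
  else if PySem.Chars.startswith (PySem.Chars.lower s) ['f','w',':'] then
    PySem.Chars.strip (s.drop 3)
  else if PySem.Chars.startswith (PySem.Chars.lower s) ['f','w','d',':'] then
    PySem.Chars.strip (s.drop 4)
  else s

-- length facts the two recursions below cite for termination
lemma lstrip_length_le (s : List Char) : (PySem.Chars.lstrip s).length ≤ s.length :=
  List.length_dropWhile_le _ _

lemma rstrip_length_le (s : List Char) : (PySem.Chars.rstrip s).length ≤ s.length := by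
  unfold PySem.Chars.rstrip
  simpa using List.length_dropWhile_le PySem.Chars.isspace s.reverse

lemma strip_length_le (s : List Char) : (PySem.Chars.strip s).length ≤ s.length :=
  le_trans (rstrip_length_le _) (lstrip_length_le _)

lemma cleanupStepA_length_le (s : List Char) : (cleanupStepA s).length ≤ s.length := by
  unfold cleanupStepA
  split_ifs <;>
    first
      | exact le_trans (strip_length_le _) (by simp)
      | exact le_rfl

-- `while True: …; if len(subject) == original_length: break`
def cleanupLoopA (s : List Char) : List Char :=
  if (cleanupStepA s).length = s.length then cleanupStepA s
  else cleanupLoopA (cleanupStepA s)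
termination_by s.length
decreasing_by
  have h := cleanupStepA_length_le s
  omega

def cleanup_subject (subject : String) : String :=
  String.ofList (cleanupLoopA (PySem.Chars.strip subject.toList))

-- ===== PORT B =====
-- termination fact the recursion below cites
lemma length_ge_of_take4_prefix (t p : List Char)
    (h : PySem.Chars.startswith (PySem.Chars.lower (t.take 4)) p = true) :
    p.length ≤ t.length ∧ p.length ≤ 4 := by
  rw [PySem.Chars.startswith_iff] at h
  have := h.length_le
  simp [PySem.Chars.lower] at this
  omega

-- `drop_prefixes`: lstrip, test the lowered first 4 chars, recurse on the tail
def dropPrefixesB (s : List Char) : List Char :=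
  if PySem.Chars.startswith (PySem.Chars.lower ((PySem.Chars.lstrip s).take 4)) ['r','e',':'] then
    dropPrefixesB ((PySem.Chars.lstrip s).drop 3)
  else if PySem.Chars.startswith (PySem.Chars.lower ((PySem.Chars.lstrip s).take 4)) ['f','w',':'] then
    dropPrefixesB ((PySem.Chars.lstrip s).drop 3)
  else if PySem.Chars.startswith (PySem.Chars.lower ((PySem.Chars.lstrip s).take 4)) ['f','w','d',':'] then
    dropPrefixesB ((PySem.Chars.lstrip s).drop 4)
  else PySem.Chars.lstrip s
termination_by s.length
decreasing_by
  · have h1 := lstrip_length_le s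
    have h2 := (length_ge_of_take4_prefix (PySem.Chars.lstrip s) ['r','e',':'] (by assumption)).1
    simp at h2 ⊢; omega
  · have h1 := lstrip_length_le s
    have h2 := (length_ge_of_take4_prefix (PySem.Chars.lstrip s) ['f','w',':'] (by assumption)).1
    simp at h2 ⊢; omega
  · have h1 := lstrip_length_le s
    have h2 := (length_ge_of_take4_prefix (PySem.Chars.lstrip s) ['f','w','d',':'] (by assumption)).1
    simp at h2 ⊢; omega

def cleanup_subject_alt (subject : String) : String :=
  String.ofList (PySem.Chars.rstrip (dropPrefixesB subject.toList))

-- ===== PRECONDITION & SPEC =====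
def Spec_cleanup_subject (subject : String) (out : String) : Prop := out = cleanup_subject_alt subject
instance (subject : String) (out : String) : Decidable (Spec_cleanup_subject subject out) := by unfold Spec_cleanup_subject; infer_instance

-- ===== CLAIM (what is proved, stated in full; the proofs are below) =====
def Claim_equal_cleanup_subject : Prop := ∀ (subject : String), Dom_cleanup_subject subject → Spec_cleanup_subject subject (cleanup_subject subject)

-- ===== LEMMAS AND PROOFS =====

lemma rstrip_append_spaces (u w : List Char) (hw : ∀ c ∈ w, PySem.Chars.isspace c = true) :
    PySem.Chars.rstrip (u ++ w) = PySem.Chars.rstrip u := by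
  have hnil : w.reverse.dropWhile PySem.Chars.isspace = [] :=
    List.dropWhile_eq_nil_iff.mpr (by simpa using hw)
  unfold PySem.Chars.rstrip
  rw [List.reverse_append, List.dropWhile_append, hnil]
  simp

lemma rstrip_spaces (w : List Char) (hw : ∀ c ∈ w, PySem.Chars.isspace c = true) :
    PySem.Chars.rstrip w = [] := by
  simpa using rstrip_append_spaces [] w hw

lemma rstrip_decomp (l : List Char) :
    ∃ w, l = PySem.Chars.rstrip l ++ w ∧ ∀ c ∈ w, PySem.Chars.isspace c = true := by
  refine ⟨(l.reverse.takeWhile PySem.Chars.isspace).reverse, ?_, ?_⟩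
  · unfold PySem.Chars.rstrip
    rw [← List.reverse_append]
    rw [List.takeWhile_append_dropWhile]
    simp
  · intro c hc
    exact List.mem_takeWhile_imp (by simpa using hc)

lemma rstrip_prefix (l : List Char) : PySem.Chars.rstrip l <+: l := by
  obtain ⟨w, hl, _⟩ := rstrip_decomp l
  exact ⟨w, hl.symm⟩

lemma rstrip_idem (l : List Char) :
    PySem.Chars.rstrip (PySem.Chars.rstrip l) = PySem.Chars.rstrip l := by
  obtain ⟨w, hl, hw⟩ := rstrip_decomp l
  calc PySem.Chars.rstrip (PySem.Chars.rstrip l)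
      = PySem.Chars.rstrip (PySem.Chars.rstrip l ++ w) := (rstrip_append_spaces _ _ hw).symm
    _ = PySem.Chars.rstrip l := by rw [← hl]

lemma rstrip_fixed_of_getLast (l : List Char) (h : l ≠ [])
    (hc : PySem.Chars.isspace (l.getLast h) = false) : PySem.Chars.rstrip l = l := by
  have hrev : l.reverse = l.getLast h :: l.dropLast.reverse := by
    conv_lhs => rw [← List.dropLast_append_getLast h]
    rw [List.reverse_append]; simp
  unfold PySem.Chars.rstrip
  rw [hrev, List.dropWhile_cons, hc]
  simp [← hrev]

lemma getLast_nonspace_of_rstrip_fixed (l : List Char) (hf : PySem.Chars.rstrip l = l)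
    (h : l ≠ []) : PySem.Chars.isspace (l.getLast h) = false := by
  by_contra hc
  rw [Bool.not_eq_false] at hc
  have hdec : l = l.dropLast ++ [l.getLast h] := (List.dropLast_append_getLast h).symm
  have : PySem.Chars.rstrip l = PySem.Chars.rstrip l.dropLast := by
    conv_lhs => rw [hdec]
    exact rstrip_append_spaces _ _ (by simpa using hc)
  have h1 : l.length ≤ l.dropLast.length := by
    calc l.length = (PySem.Chars.rstrip l).length := by rw [hf]
      _ = (PySem.Chars.rstrip l.dropLast).length := by rw [this]
      _ ≤ l.dropLast.length := rstrip_length_le _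
  have h2 : l.dropLast.length < l.length := by
    rw [List.length_dropLast]
    have : 0 < l.length := List.length_pos_iff.mpr h
    omega
  omega

lemma rstrip_fixed_drop (u : List Char) (k : Nat) (hf : PySem.Chars.rstrip u = u) :
    PySem.Chars.rstrip (u.drop k) = u.drop k := by
  by_cases hd : u.drop k = []
  · rw [hd]; rfl
  · have hu : u ≠ [] := by intro e; simp [e] at hd
    apply rstrip_fixed_of_getLast _ hd
    rw [List.getLast_drop]
    exact getLast_nonspace_of_rstrip_fixed u hf hu

lemma rstrip_drop (l : List Char) (k : Nat) :
    PySem.Chars.rstrip (l.drop k) = (PySem.Chars.rstrip l).drop k := by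
  obtain ⟨w, hl, hw⟩ := rstrip_decomp l
  have hfix : PySem.Chars.rstrip (PySem.Chars.rstrip l) = PySem.Chars.rstrip l := rstrip_idem l
  set u := PySem.Chars.rstrip l with hu
  by_cases hk : k ≤ u.length
  · conv_lhs => rw [hl]
    rw [List.drop_append_of_le_length hk, rstrip_append_spaces _ _ hw, rstrip_fixed_drop _ _ hfix]
  · have h1 : u.drop k = [] := List.drop_eq_nil_iff.mpr (by omega)
    rw [h1]
    conv_lhs => rw [hl]
    apply rstrip_spaces
    intro c hc
    rw [List.drop_append] at hc
    rcases List.mem_append.mp hc with hcu | hcw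
    · rw [List.drop_eq_nil_iff.mpr (by omega)] at hcu
      cases hcu
    · exact hw c (List.mem_of_mem_drop hcw)

lemma lstrip_drop_form (u : List Char) :
    PySem.Chars.lstrip u = u.drop (u.takeWhile PySem.Chars.isspace).length := by
  induction u with
  | nil => rfl
  | cons c cs ih =>
    unfold PySem.Chars.lstrip at *
    rw [List.dropWhile_cons, List.takeWhile_cons]
    by_cases hc : PySem.Chars.isspace c = true
    · simp [hc, ih]
    · simp [hc]

lemma lstrip_rstrip_comm (l : List Char) :
    PySem.Chars.rstrip (PySem.Chars.lstrip l) = PySem.Chars.lstrip (PySem.Chars.rstrip l) := by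
  obtain ⟨w, hl, hw⟩ := rstrip_decomp l
  have hfix : PySem.Chars.rstrip (PySem.Chars.rstrip l) = PySem.Chars.rstrip l := rstrip_idem l
  set u := PySem.Chars.rstrip l with hu
  by_cases hun : u = []
  · rw [hun] at hl
    simp at hl
    have : PySem.Chars.lstrip l = [] := by
      rw [hl]
      exact List.dropWhile_eq_nil_iff.mpr hw
    rw [this, hun]
    rfl
  · have hlast := getLast_nonspace_of_rstrip_fixed u hfix hun
    have hne : u.dropWhile PySem.Chars.isspace ≠ [] := by
      intro e
      have := List.dropWhile_eq_nil_iff.mp e (u.getLast hun) (List.getLast_mem hun)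
      rw [hlast] at this
      exact Bool.false_ne_true this
    have hsplit : PySem.Chars.lstrip l = PySem.Chars.lstrip u ++ w := by
      conv_lhs => rw [hl]
      unfold PySem.Chars.lstrip
      rw [List.dropWhile_append]
      simp [hne]
    rw [hsplit, rstrip_append_spaces _ _ hw, lstrip_drop_form u, rstrip_fixed_drop _ _ hfix]

lemma strip_rstrip (l : List Char) :
    PySem.Chars.strip (PySem.Chars.rstrip l) = PySem.Chars.strip l := by
  unfold PySem.Chars.strip
  rw [lstrip_rstrip_comm (PySem.Chars.rstrip l), rstrip_idem, ← lstrip_rstrip_comm]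

lemma nonspace_of_lower_colon (c : Char) (h : PySem.Chars.lowerChar c = ':') :
    PySem.Chars.isspace c = false := by
  by_cases hu : PySem.Chars.isupper c = true
  · simp only [PySem.Chars.isupper, Bool.and_eq_true, decide_eq_true_eq, Char.le_def,
      UInt32.le_iff_toNat_le] at hu
    have h1 : ('A').val.toNat = 65 := rfl
    have h2 : ('Z').val.toNat = 90 := rfl
    rw [h1] at hu; rw [h2] at hu
    simp only [PySem.Chars.isspace, Char.toNat, Bool.or_eq_false_iff, Bool.and_eq_false_iff,
      decide_eq_false_iff_not]
    omega
  · have hc : c = ':' := by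
      simpa [PySem.Chars.lowerChar, hu] using h
    rw [hc]
    decide

lemma prefix_lower_rstrip_iff (t p : List Char) (hp : p ≠ []) (hlast : p.getLast hp = ':') :
    p <+: PySem.Chars.lower (PySem.Chars.rstrip t) ↔ p <+: PySem.Chars.lower t := by
  constructor
  · intro h
    exact h.trans (List.IsPrefix.map _ (rstrip_prefix t))
  · intro h
    have hpos : 0 < p.length := List.length_pos_iff.mpr hp
    have hlen : p.length ≤ t.length := by
      have := h.length_le
      simpa [PySem.Chars.lower] using this
    have hchar : PySem.Chars.lowerChar (t[p.length - 1]'(by omega)) = ':' := by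
      have hg := List.IsPrefix.getElem h (i := p.length - 1) (by omega)
      rw [List.getLast_eq_getElem] at hlast
      simp only [PySem.Chars.lower, List.getElem_map] at hg
      rw [← hg]
      exact hlast
    have hsp : PySem.Chars.isspace (t[p.length - 1]'(by omega)) = false :=
      nonspace_of_lower_colon _ hchar
    obtain ⟨w, ht, hw⟩ := rstrip_decomp t
    set u := PySem.Chars.rstrip t with hu
    have hk : p.length ≤ u.length := by
      by_contra hlt
      push_neg at hlt
      have hlen2 : t.length = u.length + w.length := by
        conv_lhs => rw [ht]
        simp
      have hidx : t[p.length - 1]'(by omega) = w[p.length - 1 - u.length]'(by omega) := by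
        conv_lhs => rw [List.getElem_of_eq ht]
        rw [List.getElem_append_right (by omega)]
      rw [hidx] at hsp
      have hmem : w[p.length - 1 - u.length]'(by omega) ∈ w := List.getElem_mem _
      simp [hw _ hmem] at hsp
    have hu_take : u = t.take u.length := List.prefix_iff_eq_take.mp (rstrip_prefix t)
    rw [List.prefix_iff_eq_take] at h ⊢
    rw [hu_take]
    simp only [PySem.Chars.lower, List.map_take]
    rw [List.take_take, min_eq_left hk]
    exact h
  
lemma prefix_lower_take4_iff (t p : List Char) (h4 : p.length ≤ 4) :
    p <+: PySem.Chars.lower (t.take 4) ↔ p <+: PySem.Chars.lower t := by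
  simp only [PySem.Chars.lower, List.map_take]
  rw [List.prefix_take_iff]
  simp [h4]

lemma condAB (t p : List Char) (hp : p ≠ []) (hlast : p.getLast hp = ':') (h4 : p.length ≤ 4) :
    PySem.Chars.startswith (PySem.Chars.lower (PySem.Chars.rstrip t)) p
      = PySem.Chars.startswith (PySem.Chars.lower (t.take 4)) p := by
  rw [Bool.eq_iff_iff, PySem.Chars.startswith_iff, PySem.Chars.startswith_iff,
    prefix_lower_rstrip_iff t p hp hlast, prefix_lower_take4_iff t p h4]

theorem main_aux (n : Nat) : ∀ (l : List Char), l.length < n →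
    cleanupLoopA (PySem.Chars.strip l) = PySem.Chars.rstrip (dropPrefixesB l) := by
  induction n with
  | zero => intro l hl; omega
  | succ n ih =>
    intro l hl
    rw [dropPrefixesB]
    simp only [PySem.Chars.strip]
    set t := PySem.Chars.lstrip l with htdef
    have htlen : t.length ≤ l.length := lstrip_length_le l
    have hcre := condAB t ['r','e',':'] (by simp) (by simp) (by simp)
    have hcfw := condAB t ['f','w',':'] (by simp) (by simp) (by simp)
    have hcfwd := condAB t ['f','w','d',':'] (by simp) (by simp) (by simp)
    by_cases hre : PySem.Chars.startswith (PySem.Chars.lower (t.take 4)) ['r','e',':'] = true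
    · rw [if_pos hre, cleanupLoopA]
      have hstep : cleanupStepA (PySem.Chars.rstrip t)
          = PySem.Chars.strip ((PySem.Chars.rstrip t).drop 3) := by
        unfold cleanupStepA
        rw [hcre, if_pos hre]
      have h3 : 3 ≤ t.length := by simpa using (length_ge_of_take4_prefix t _ hre).1
      have hkle : 3 ≤ (PySem.Chars.rstrip t).length := by
        have hpre : (['r','e',':'] : List Char) <+: PySem.Chars.lower (PySem.Chars.rstrip t) := by
          rw [← PySem.Chars.startswith_iff, hcre]
          exact hre
        simpa [PySem.Chars.lower] using hpre.length_le
      have hlt : (PySem.Chars.strip ((PySem.Chars.rstrip t).drop 3)).length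
          < (PySem.Chars.rstrip t).length := by
        have hb := strip_length_le ((PySem.Chars.rstrip t).drop 3)
        simp [List.length_drop] at hb
        omega
      rw [hstep, if_neg (by omega), ← rstrip_drop, strip_rstrip]
      apply ih
      simp [List.length_drop]
      omega
    · rw [if_neg hre]
      by_cases hfw : PySem.Chars.startswith (PySem.Chars.lower (t.take 4)) ['f','w',':'] = true
      · rw [if_pos hfw, cleanupLoopA]
        have hstep : cleanupStepA (PySem.Chars.rstrip t)
            = PySem.Chars.strip ((PySem.Chars.rstrip t).drop 3) := by
          unfold cleanupStepA
          rw [hcre, hcfw, if_neg hre, if_pos hfw]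
        have h3 : 3 ≤ t.length := by simpa using (length_ge_of_take4_prefix t _ hfw).1
        have hkle : 3 ≤ (PySem.Chars.rstrip t).length := by
          have hpre : (['f','w',':'] : List Char) <+: PySem.Chars.lower (PySem.Chars.rstrip t) := by
            rw [← PySem.Chars.startswith_iff, hcfw]
            exact hfw
          simpa [PySem.Chars.lower] using hpre.length_le
        have hlt : (PySem.Chars.strip ((PySem.Chars.rstrip t).drop 3)).length
            < (PySem.Chars.rstrip t).length := by
          have hb := strip_length_le ((PySem.Chars.rstrip t).drop 3)
          simp [List.length_drop] at hb
          omega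
        rw [hstep, if_neg (by omega), ← rstrip_drop, strip_rstrip]
        apply ih
        simp [List.length_drop]
        omega
      · rw [if_neg hfw]
        by_cases hfwd : PySem.Chars.startswith (PySem.Chars.lower (t.take 4)) ['f','w','d',':'] = true
        · rw [if_pos hfwd, cleanupLoopA]
          have hstep : cleanupStepA (PySem.Chars.rstrip t)
              = PySem.Chars.strip ((PySem.Chars.rstrip t).drop 4) := by
            unfold cleanupStepA
            rw [hcre, hcfw, hcfwd, if_neg hre, if_neg hfw, if_pos hfwd]
          have h4 : 4 ≤ t.length := by simpa using (length_ge_of_take4_prefix t _ hfwd).1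
          have hkle : 4 ≤ (PySem.Chars.rstrip t).length := by
            have hpre : (['f','w','d',':'] : List Char) <+: PySem.Chars.lower (PySem.Chars.rstrip t) := by
              rw [← PySem.Chars.startswith_iff, hcfwd]
              exact hfwd
            simpa [PySem.Chars.lower] using hpre.length_le
          have hlt : (PySem.Chars.strip ((PySem.Chars.rstrip t).drop 4)).length
              < (PySem.Chars.rstrip t).length := by
            have hb := strip_length_le ((PySem.Chars.rstrip t).drop 4)
            simp [List.length_drop] at hb
            omega
          rw [hstep, if_neg (by omega), ← rstrip_drop, strip_rstrip]
          apply ih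
          simp [List.length_drop]
          omega
        · rw [if_neg hfwd, cleanupLoopA]
          have hstep : cleanupStepA (PySem.Chars.rstrip t) = PySem.Chars.rstrip t := by
            unfold cleanupStepA
            rw [hcre, hcfw, hcfwd, if_neg hre, if_neg hfw, if_neg hfwd]
          rw [hstep, if_pos rfl]
  
-- ===== VERDICT (by name: the statement is the Claim_ definition above) =====
theorem cleanup_subject_spec : Claim_equal_cleanup_subject := by
  intro subject _
  unfold Spec_cleanup_subject cleanup_subject cleanup_subject_alt
  rw [main_aux (subject.toList.length + 1) subject.toList (by omega)]
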